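-- pv_equiv track=rewrite | github.com/LinneaSandberg/python-course | 01/final-assignment/main.py | assign_candidates_to_stations
-- ===== SOURCE A (Python) =====
-- def assign_candidates_to_stations(stations, candidates):
--     assignments_dic = {}
--     candidates_assigned = set()
--
--     while len(assignments_dic) < len(stations):
--         any_assignments = False
--
--         for station, qualification in stations:
--             if station in assignments_dic:
--                 continue
--
--             best_match = None
--             most_experience = -1
--
--             for candidate in candidates:
--                 name, qual, experience = candidate
--                 if name not in candidates_assigned and qual == qualification:
--                     if experience > most_experience:
--                         most_experience = experience
--                         best_match = name
--
--             if best_match: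
--                 assignments_dic[station] = best_match
--                 candidates_assigned.add(best_match)
--                 any_assignments = True
--
--         if not any_assignments:
--             break
--     return assignments_dic
-- ===== SOURCE B (Python) =====
-- def assign_candidates_to_stations(stations, candidates):
--     # Sort candidates by experience (descending, stable) once; each station
--     # then takes the first still-free candidate with the right qualification.
--     ranked = sorted(candidates, key=lambda c: -c[2])
--     assignments = {}
--     assigned = set()
--     for station, qualification in stations:
--         if station in assignments:
--             continue
--         for name, qual, _ in ranked:
--             if qual == qualification and name not in assigned:
--                 assignments[station] = name
--                 assigned.add(name)
--                 break
--     return assignments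
-- ===== Notes on version B (the rewrite author's own statement) =====
-- stated objective: alternative
-- what changed: A rescans the whole candidate list per station, tracking a best-so-far, inside a retry while-loop; B sorts candidates by experience once (descending, stable) and serves each station the first still-free matching candidate in a single pass. Pre_ restricts to the natural domain (nonempty candidate names, nonnegative experience): on malformed candidates A's truthiness test and -1 sentinel silently drop the candidate.
-- outside the precondition, e.g. on assign_candidates_to_stations([('s', 'q')], [('bob', 'q', -1)]): A returns {}, B returns {'s': 'bob'}; on assign_candidates_to_stations([('s', 'q')], [('', 'q', 1)]): A returns {}, B returns {'s': ''}
import Mathlib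
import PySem

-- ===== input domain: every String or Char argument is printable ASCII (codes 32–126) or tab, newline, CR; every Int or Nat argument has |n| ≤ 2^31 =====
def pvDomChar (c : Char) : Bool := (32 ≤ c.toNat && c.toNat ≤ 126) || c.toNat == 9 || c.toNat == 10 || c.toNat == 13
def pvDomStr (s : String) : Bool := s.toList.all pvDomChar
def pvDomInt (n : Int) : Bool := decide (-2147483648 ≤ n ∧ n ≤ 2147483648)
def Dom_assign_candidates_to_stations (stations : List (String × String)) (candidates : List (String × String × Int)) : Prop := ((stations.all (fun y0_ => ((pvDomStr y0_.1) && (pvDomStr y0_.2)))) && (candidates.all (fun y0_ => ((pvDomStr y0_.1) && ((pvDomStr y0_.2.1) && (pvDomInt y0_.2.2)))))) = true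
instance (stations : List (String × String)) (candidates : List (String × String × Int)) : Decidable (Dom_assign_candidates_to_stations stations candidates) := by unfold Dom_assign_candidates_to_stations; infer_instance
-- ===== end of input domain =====

-- B sorts the candidates by experience once (descending, stable) and serves each station the first free matching candidate, instead of A's tracked-best rescan of all candidates per station inside a retry loop (alternative algorithm).
-- Pre_ restricts to the task's natural domain (nonempty candidate names, nonnegative experience for candidates matching a station); see the comment at Pre_.


-- ===== PORT A =====
-- inner `for candidate in candidates` loop: tracks (best_match, most_experience)
def pvA_scan (candidates : List (String × String × Int)) (assigned : PySem.Set String) (qualification : String) : Option String × Int :=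
  candidates.foldl (fun acc c =>
    if !(PySem.Set.contains assigned c.1) && (c.2.1 == qualification) then
      if c.2.2 > acc.2 then (some c.1, c.2.2) else acc
    else acc) (none, -1)

-- body of `for station, qualification in stations` (state: assignments_dic, candidates_assigned, any_assignments)
def pvA_step (candidates : List (String × String × Int))
    (st : PySem.Dict String String × PySem.Set String × Bool) (s : String × String) :
    PySem.Dict String String × PySem.Set String × Bool :=
  if st.1.contains s.1 then st
  else
    match pvA_scan candidates st.2.1 s.2 with
    | (some n, _) => if n == "" then st else (st.1.insert s.1 n, PySem.Set.add st.2.1 n, true)  -- `if best_match:` — falsy for None and ""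
    | (none, _) => st

-- one full pass of the for-loop, any_assignments starting at False
def pvA_pass (candidates : List (String × String × Int)) (stations : List (String × String))
    (d : PySem.Dict String String) (a : PySem.Set String) :
    PySem.Dict String String × PySem.Set String × Bool :=
  stations.foldl (pvA_step candidates) (d, a, false)

-- the while-loop; fuel = stations.length + 1 is provably enough: every non-breaking
-- iteration grows the dict and the loop only continues while dict.size < stations.length
def pvA_loop (stations : List (String × String)) (candidates : List (String × String × Int)) :
    Nat → PySem.Dict String String → PySem.Set String → PySem.Dict String String
  | 0, d, _ => d
  | fuel + 1, d, a =>
    if d.size < stations.length then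
      let r := pvA_pass candidates stations d a
      if r.2.2 then pvA_loop stations candidates fuel r.1 r.2.1 else r.1
    else d

def assign_candidates_to_stations (stations : List (String × String)) (candidates : List (String × String × Int)) : List (String × String) :=
  (pvA_loop stations candidates (stations.length + 1) PySem.Dict.empty PySem.Set.empty).items

-- ===== PORT B =====
-- key=lambda c: -c[2]
def pvKey (c : String × String × Int) : Int := -c.2.2

-- body of `for station, qualification in stations`: first free matching candidate of the ranked list
def pvB_step (ranked : List (String × String × Int))
    (st : PySem.Dict String String × PySem.Set String) (s : String × String) :
    PySem.Dict String String × PySem.Set String :=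
  if st.1.contains s.1 then st
  else
    match ranked.find? (fun c => c.2.1 == s.2 && !(PySem.Set.contains st.2 c.1)) with
    | none => st
    | some c => (st.1.insert s.1 c.1, PySem.Set.add st.2 c.1)

def assign_candidates_to_stations_alt (stations : List (String × String)) (candidates : List (String × String × Int)) : List (String × String) :=
  let ranked := PySem.List.sorted candidates pvKey false
  (stations.foldl (pvB_step ranked) (PySem.Dict.empty, PySem.Set.empty)).1.items

-- ===== PRECONDITION & SPEC =====
-- Pre_ restricts to the task's natural domain: every candidate that matches some station's
-- required qualification has a nonempty name and a nonnegative experience. On such malformed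
-- candidates (empty name or negative experience) A's `if best_match:` truthiness test and `-1`
-- sentinel silently drop the candidate, while B assigns it like any other; such inputs are excluded.
def Pre_assign_candidates_to_stations (stations : List (String × String)) (candidates : List (String × String × Int)) : Prop :=
  ∀ c ∈ candidates, c.2.1 ∈ stations.map (fun s => s.2) → c.1 ≠ "" ∧ 0 ≤ c.2.2
instance (stations : List (String × String)) (candidates : List (String × String × Int)) : Decidable (Pre_assign_candidates_to_stations stations candidates) := by unfold Pre_assign_candidates_to_stations; infer_instance

def pvWitness_assign_candidates_to_stations : (List (String × String)) × (List (String × String × Int)) :=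
  ([("s1", "first aid"), ("s2", "fire")], [("ann", "fire", 3), ("bob", "first aid", 1), ("eva", "fire", 5)])

def Spec_assign_candidates_to_stations (stations : List (String × String)) (candidates : List (String × String × Int)) (out : List (String × String)) : Prop := out = assign_candidates_to_stations_alt stations candidates
instance (stations : List (String × String)) (candidates : List (String × String × Int)) (out : List (String × String)) : Decidable (Spec_assign_candidates_to_stations stations candidates out) := by unfold Spec_assign_candidates_to_stations; infer_instance

-- ===== CLAIM (what is proved, stated in full; the proofs are below) =====
def Claim_equal_assign_candidates_to_stations : Prop := ∀ (stations : List (String × String)) (candidates : List (String × String × Int)), Dom_assign_candidates_to_stations stations candidates → Pre_assign_candidates_to_stations stations candidates → Spec_assign_candidates_to_stations stations candidates (assign_candidates_to_stations stations candidates)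

-- ===== LEMMAS AND PROOFS =====

-- named loop body of A's inner scan
def pvScanStep (a : PySem.Set String) (q : String) :
    (Option String × Int) → (String × String × Int) → Option String × Int :=
  fun acc c =>
    if !(PySem.Set.contains a c.1) && (c.2.1 == q) then
      if c.2.2 > acc.2 then (some c.1, c.2.2) else acc
    else acc

theorem pvScan_eq_foldl (cs : List (String × String × Int)) (a : PySem.Set String) (q : String) :
    pvA_scan cs a q = cs.foldl (pvScanStep a q) (none, -1) := rfl

-- B's availability predicate for a station with qualification q
def pvP (a : PySem.Set String) (q : String) (c : String × String × Int) : Bool :=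
  c.2.1 == q && !(PySem.Set.contains a c.1)

-- head-evolution step of the stable insertion sort (= running first-max of experience)
def pvHStep (h : Option (String × String × Int)) (c : String × String × Int) :
    Option (String × String × Int) :=
  match h with
  | none => some c
  | some m => if decide (pvKey c < pvKey m) then some c else some m

def pvIns (acc : List (String × String × Int)) (x : String × String × Int) :
    List (String × String × Int) :=
  PySem.List.insertBy (fun a b => decide (pvKey a < pvKey b)) x acc

theorem pvSorted_eq (xs : List (String × String × Int)) :
    PySem.List.sorted xs pvKey false = xs.foldl pvIns [] :=
  PySem.List.sorted_eq_foldl_insertBy xs pvKey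

theorem pvHStep_isSome (h : Option (String × String × Int)) (c : String × String × Int) :
    (pvHStep h c).isSome := by
  cases h with
  | none => rfl
  | some m => simp only [pvHStep]; split <;> rfl

theorem pvHFold_none_iff (l : List (String × String × Int)) :
    ∀ h : Option (String × String × Int), l.foldl pvHStep h = none ↔ l = [] ∧ h = none := by
  induction l with
  | nil => intro h; simp
  | cons c t ih =>
    intro h
    simp only [List.foldl_cons, ih]
    constructor
    · rintro ⟨-, hnone⟩
      have := pvHStep_isSome h c
      rw [hnone] at this
      exact absurd this (by simp)
    · rintro ⟨hcon, -⟩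
      exact absurd hcon (by simp)

theorem pvHFold_some_mem (l : List (String × String × Int)) :
    ∀ (h : Option (String × String × Int)) (c : String × String × Int),
      l.foldl pvHStep h = some c → h = some c ∨ c ∈ l := by
  induction l with
  | nil => intro h c hc; exact Or.inl hc
  | cons x t ih =>
    intro h c hc
    rcases ih (pvHStep h x) c hc with h' | h'
    · cases h with
      | none =>
        have : x = c := by simpa [pvHStep] using h'
        exact Or.inr (this ▸ List.mem_cons_self ..)
      | some m =>
        by_cases hlt : pvKey x < pvKey m
        · have : x = c := by simpa [pvHStep, hlt] using h'
          exact Or.inr (this ▸ List.mem_cons_self ..)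
        · have : m = c := by simpa [pvHStep, hlt] using h'
          exact Or.inl (by rw [this])
    · exact Or.inr (List.mem_cons_of_mem _ h')

theorem pvHead_insertBy (x : String × String × Int) (acc : List (String × String × Int)) :
    (pvIns acc x).head? = pvHStep acc.head? x := by
  cases acc with
  | nil => rfl
  | cons y t =>
    simp only [pvIns, PySem.List.insertBy, pvHStep, List.head?_cons]
    split <;> simp

theorem pvHead_insertAll (xs : List (String × String × Int)) :
    ∀ acc : List (String × String × Int),
      (xs.foldl pvIns acc).head? = xs.foldl pvHStep acc.head? := by
  induction xs with
  | nil => intro acc; rfl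
  | cons x t ih =>
    intro acc
    simp only [List.foldl_cons]
    rw [ih (pvIns acc x), pvHead_insertBy]

theorem pvIns_pairwise (x : String × String × Int) (acc : List (String × String × Int))
    (hs : acc.Pairwise (fun a b => pvKey a ≤ pvKey b)) :
    (pvIns acc x).Pairwise (fun a b => pvKey a ≤ pvKey b) := by
  induction acc with
  | nil => simp [pvIns, PySem.List.insertBy]
  | cons y t ih =>
    rcases List.pairwise_cons.mp hs with ⟨hy, ht⟩
    by_cases hb : pvKey x < pvKey y
    · have hx : pvIns (y :: t) x = x :: y :: t := by
        simp [pvIns, PySem.List.insertBy, hb]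
      rw [hx]
      refine List.pairwise_cons.mpr ⟨?_, hs⟩
      intro z hz
      rcases List.mem_cons.mp hz with rfl | hz
      · exact le_of_lt hb
      · exact le_trans (le_of_lt hb) (hy z hz)
    · have hx : pvIns (y :: t) x = y :: pvIns t x := by
        simp [pvIns, PySem.List.insertBy, hb]
      rw [hx]
      refine List.pairwise_cons.mpr ⟨?_, ih ht⟩
      intro z hz
      rcases (PySem.List.mem_insertBy _ x z t).mp hz with rfl | hz
      · omega
      · exact hy z hz

theorem pvIns_front (x : String × String × Int) (l : List (String × String × Int))
    (h : ∀ z ∈ l, pvKey x < pvKey z) : pvIns l x = x :: l := by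
  cases l with
  | nil => rfl
  | cons z t =>
    have := h z (List.mem_cons_self ..)
    simp [pvIns, PySem.List.insertBy, this]

theorem pvIns_filter (p : (String × String × Int) → Bool) (x : String × String × Int)
    (acc : List (String × String × Int)) (hs : acc.Pairwise (fun a b => pvKey a ≤ pvKey b)) :
    (pvIns acc x).filter p = if p x then pvIns (acc.filter p) x else acc.filter p := by
  induction acc with
  | nil => cases hp : p x <;> simp [pvIns, PySem.List.insertBy, hp]
  | cons y t ih =>
    rcases List.pairwise_cons.mp hs with ⟨hy, ht⟩
    by_cases hb : pvKey x < pvKey y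
    · have hx : pvIns (y :: t) x = x :: y :: t := by
        simp [pvIns, PySem.List.insertBy, hb]
      by_cases hp : p x = true
      · have hfront : pvIns ((y :: t).filter p) x = x :: (y :: t).filter p := by
          apply pvIns_front
          intro z hz
          rcases List.mem_cons.mp (List.mem_of_mem_filter hz) with rfl | hz'
          · exact hb
          · exact lt_of_lt_of_le hb (hy z hz')
        rw [hx, List.filter_cons_of_pos hp, if_pos hp, hfront]
      · rw [hx, List.filter_cons_of_neg hp, if_neg hp]
    · have hx : pvIns (y :: t) x = y :: pvIns t x := by
        simp [pvIns, PySem.List.insertBy, hb]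
      have hins : ∀ l, pvIns (y :: l) x = y :: pvIns l x := fun l => by
        simp [pvIns, PySem.List.insertBy, hb]
      by_cases hpy : p y = true
      · rw [hx, List.filter_cons_of_pos hpy, List.filter_cons_of_pos hpy, ih ht]
        by_cases hp : p x = true
        · rw [if_pos hp, if_pos hp, hins (t.filter p)]
        · rw [if_neg hp, if_neg hp]
      · rw [hx, List.filter_cons_of_neg hpy, List.filter_cons_of_neg hpy, ih ht]

theorem pvInsAll_filter (p : (String × String × Int) → Bool) (xs : List (String × String × Int)) :
    ∀ acc : List (String × String × Int), acc.Pairwise (fun a b => pvKey a ≤ pvKey b) →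
      (xs.foldl pvIns acc).filter p = (xs.filter p).foldl pvIns (acc.filter p) := by
  induction xs with
  | nil => intro acc _; rfl
  | cons x t ih =>
    intro acc hs
    simp only [List.foldl_cons]
    rw [ih (pvIns acc x) (pvIns_pairwise x acc hs), pvIns_filter p x acc hs]
    cases hp : p x with
    | false => simp [List.filter_cons, hp]
    | true => simp [List.filter_cons, hp]

theorem pvFind_sorted (p : (String × String × Int) → Bool) (xs : List (String × String × Int)) :
    (PySem.List.sorted xs pvKey false).find? p = (xs.filter p).foldl pvHStep none := by
  rw [← List.head?_filter, pvSorted_eq, pvInsAll_filter p xs [] (by simp)]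
  simpa using pvHead_insertAll (xs.filter p) []

-- coupling between A's (best_match, most_experience) accumulator and the ranked head
def pvRel (pr : Option String × Int) (h : Option (String × String × Int)) : Prop :=
  (∃ c, h = some c ∧ pr = (some c.1, c.2.2) ∧ 0 ≤ c.2.2) ∨ (pr = (none, -1) ∧ h = none)

theorem pvScan_bisim (a : PySem.Set String) (q : String) :
    ∀ (cs : List (String × String × Int)), (∀ c ∈ cs, c.2.1 = q → 0 ≤ c.2.2) →
      ∀ (pr : Option String × Int) (h : Option (String × String × Int)), pvRel pr h →
        pvRel (cs.foldl (pvScanStep a q) pr) ((cs.filter (pvP a q)).foldl pvHStep h) := by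
  intro cs
  induction cs with
  | nil => intro _ pr h hrel; exact hrel
  | cons c t ih =>
    intro hPre pr h hrel
    have hPre' : ∀ x ∈ t, x.2.1 = q → (0 : Int) ≤ x.2.2 :=
      fun x hx => hPre x (List.mem_cons_of_mem _ hx)
    by_cases hq : pvP a q c = true
    · have hq1 : c.2.1 = q := by
        simp only [pvP, Bool.and_eq_true] at hq
        simpa using hq.1
      have hc : (0 : Int) ≤ c.2.2 := hPre c (List.mem_cons_self ..) hq1
      have hq2 : PySem.Set.contains a c.1 = false := by
        simp only [pvP, Bool.and_eq_true] at hq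
        simpa using hq.2
      have hcond : (!(PySem.Set.contains a c.1) && (c.2.1 == q)) = true := by
        simp only [pvP, Bool.and_eq_true] at hq
        rw [hq2, hq.1]
        rfl
      simp only [List.filter_cons, hq, if_pos, List.foldl_cons]
      apply ih hPre'
      have hsA : pvScanStep a q pr c = if c.2.2 > pr.2 then (some c.1, c.2.2) else pr := by
        simp only [pvScanStep, hcond, if_pos]
      rcases hrel with ⟨m, hh, hpr, hm⟩ | ⟨hpr, hh⟩
      · subst hh; subst hpr
        have hsB : pvHStep (some m) c = if m.2.2 < c.2.2 then some c else some m := by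
          by_cases hlt : m.2.2 < c.2.2
          · simp [pvHStep, pvKey, hlt, show (-c.2.2 : Int) < -m.2.2 by omega]
          · simp [pvHStep, pvKey, hlt, show ¬ ((-c.2.2 : Int) < -m.2.2) by omega]
        rw [hsA, hsB]
        by_cases hlt : m.2.2 < c.2.2
        · simp only [gt_iff_lt, hlt, if_pos]
          exact Or.inl ⟨c, rfl, rfl, hc⟩
        · simp only [gt_iff_lt, hlt, if_neg, not_false_iff, if_false]
          exact Or.inl ⟨m, rfl, rfl, hm⟩
      · subst hpr; subst hh
        have hgt : c.2.2 > (-1 : Int) := by omega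
        rw [hsA]
        simp only [gt_iff_lt, hgt, if_pos]
        exact Or.inl ⟨c, rfl, rfl, hc⟩
    · have hcond : (!(PySem.Set.contains a c.1) && (c.2.1 == q)) = false := by
        cases h1 : (c.2.1 == q) <;> cases h2 : PySem.Set.contains a c.1 <;>
          simp_all [pvP]
      have hstep : pvScanStep a q pr c = pr := by
        simp only [pvScanStep, hcond, Bool.false_eq_true, if_false]
      simp only [List.filter_cons, hq, Bool.false_eq_true, if_false, List.foldl_cons, hstep]
      exact ih hPre' pr h hrel

theorem pvScan_some_mem (a : PySem.Set String) (q : String) :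
    ∀ (cs : List (String × String × Int)) (pr : Option String × Int) (n : String),
      (cs.foldl (pvScanStep a q) pr).1 = some n →
        pr.1 = some n ∨ ∃ c ∈ cs, c.1 = n ∧ c.2.1 = q := by
  intro cs
  induction cs with
  | nil => intro pr n h; exact Or.inl h
  | cons c t ih =>
    intro pr n h
    rcases ih (pvScanStep a q pr c) n h with h' | ⟨c', hc', hn, hq'⟩
    · by_cases hcnd : (!(PySem.Set.contains a c.1) && (c.2.1 == q)) = true
      · have hq1 : c.2.1 = q := by
          rcases Bool.and_eq_true .. |>.mp hcnd with ⟨-, h2⟩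
          simpa using h2
        simp only [pvScanStep, hcnd, if_pos] at h'
        by_cases hgt : c.2.2 > pr.2
        · refine Or.inr ⟨c, List.mem_cons_self .., ?_, hq1⟩
          rw [if_pos hgt] at h'
          simpa using h'
        · rw [if_neg hgt] at h'
          exact Or.inl h'
      · have hcndF : (!(PySem.Set.contains a c.1) && (c.2.1 == q)) = false := by
          simpa using hcnd
        simp only [pvScanStep, hcndF, Bool.false_eq_true, if_false] at h'
        exact Or.inl h'
    · exact Or.inr ⟨c', List.mem_cons_of_mem _ hc', hn, hq'⟩

-- A's choice for a station with qualification q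
def pvChoose (cs : List (String × String × Int)) (a : PySem.Set String) (q : String) : Option String :=
  (pvA_scan cs a q).1

-- the per-station step: B equals the (dict, set) projection of A's step
theorem pvStep_proj (cs : List (String × String × Int)) (s : String × String)
    (hPre : ∀ c ∈ cs, c.2.1 = s.2 → c.1 ≠ "" ∧ 0 ≤ c.2.2)
    (st : PySem.Dict String String × PySem.Set String × Bool) :
    ((pvA_step cs st s).1, (pvA_step cs st s).2.1)
      = pvB_step (PySem.List.sorted cs pvKey false) (st.1, st.2.1) s := by
  obtain ⟨d, a, any⟩ := st
  by_cases hc : d.contains s.1 = true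
  · simp [pvA_step, pvB_step, hc]
  · have hcF : d.contains s.1 = false := by simpa using hc
    have hfind : (PySem.List.sorted cs pvKey false).find?
        (fun c => c.2.1 == s.2 && !(PySem.Set.contains a c.1))
        = (cs.filter (pvP a s.2)).foldl pvHStep none := pvFind_sorted (pvP a s.2) cs
    have hrel := pvScan_bisim a s.2 cs (fun c hcm hq => (hPre c hcm hq).2) (none, -1) none
      (Or.inr ⟨rfl, rfl⟩)
    rw [← pvScan_eq_foldl] at hrel
    rcases hrel with ⟨c, hh, hpr, -⟩ | ⟨hpr, hh⟩
    · have hmem : c ∈ cs.filter (pvP a s.2) := by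
        rcases pvHFold_some_mem _ none c hh with h' | h'
        · exact absurd h' (by simp)
        · exact h'
      rcases List.mem_filter.mp hmem with ⟨hcs, hcp⟩
      have hq1 : c.2.1 = s.2 := by
        rcases Bool.and_eq_true .. |>.mp hcp with ⟨h1, -⟩
        simpa using h1
      have hname : (c.1 == "") = false := by
        have := (hPre c hcs hq1).1
        simpa using this
      have hB : pvB_step (PySem.List.sorted cs pvKey false) (d, a) s
          = (d.insert s.1 c.1, PySem.Set.add a c.1) := by
        simp only [pvB_step, hcF, Bool.false_eq_true, if_false]
        rw [hfind, hh]
      have hA : pvA_step cs (d, a, any) s = (d.insert s.1 c.1, PySem.Set.add a c.1, true) := by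
        simp only [pvA_step, hcF, Bool.false_eq_true, if_false, hpr, hname]
      rw [hA, hB]
    · have hB : pvB_step (PySem.List.sorted cs pvKey false) (d, a) s = (d, a) := by
        simp only [pvB_step, hcF, Bool.false_eq_true, if_false]
        rw [hfind, hh]
      have hA : pvA_step cs (d, a, any) s = (d, a, any) := by
        simp only [pvA_step, hcF, Bool.false_eq_true, if_false, hpr]
      rw [hA, hB]

theorem pvPass_proj (cs : List (String × String × Int)) (sts : List (String × String))
    (hPre : ∀ s ∈ sts, ∀ c ∈ cs, c.2.1 = s.2 → c.1 ≠ "" ∧ 0 ≤ c.2.2) :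
    ∀ (st : PySem.Dict String String × PySem.Set String × Bool),
    ((sts.foldl (pvA_step cs) st).1, (sts.foldl (pvA_step cs) st).2.1) =
      sts.foldl (pvB_step (PySem.List.sorted cs pvKey false)) (st.1, st.2.1) := by
  induction sts with
  | nil => intro st; rfl
  | cons s rest ih =>
    intro st
    simp only [List.foldl_cons]
    rw [← pvStep_proj cs s (hPre s (List.mem_cons_self ..)) st]
    exact ih (fun s' hs' => hPre s' (List.mem_cons_of_mem _ hs')) (pvA_step cs st s)

-- A's choice is none exactly when no unassigned candidate matches (under Pre_)
theorem pvChoose_none_iff (cs : List (String × String × Int)) (a : PySem.Set String) (q : String)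
    (hPre : ∀ c ∈ cs, c.2.1 = q → (0 : Int) ≤ c.2.2) :
    pvChoose cs a q = none ↔ ∀ c ∈ cs, pvP a q c = false := by
  have hrel := pvScan_bisim a q cs hPre (none, -1) none (Or.inr ⟨rfl, rfl⟩)
  rw [← pvScan_eq_foldl] at hrel
  constructor
  · intro h0
    rcases hrel with ⟨c, hh, hpr, -⟩ | ⟨hpr, hh⟩
    · rw [show pvChoose cs a q = (pvA_scan cs a q).1 from rfl, hpr] at h0
      exact absurd h0 (by simp)
    · have hfil := ((pvHFold_none_iff _ none).mp hh).1
      intro c hcm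
      by_contra hcon
      have : c ∈ cs.filter (pvP a q) :=
        List.mem_filter.mpr ⟨hcm, by simpa using hcon⟩
      rw [hfil] at this
      exact absurd this (by simp)
  · intro hall
    have hfil : cs.filter (pvP a q) = [] :=
      List.filter_eq_nil_iff.mpr (fun c hcm => by simp [hall c hcm])
    rcases hrel with ⟨c, hh, hpr, -⟩ | ⟨hpr, hh⟩
    · rw [hfil] at hh
      exact absurd hh (by simp)
    · show (pvA_scan cs a q).1 = none
      rw [hpr]

theorem pvChoose_none_mono (cs : List (String × String × Int)) (a a' : PySem.Set String) (q : String)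
    (hPre : ∀ c ∈ cs, c.2.1 = q → (0 : Int) ≤ c.2.2)
    (hsub : ∀ x, PySem.Set.contains a x = true → PySem.Set.contains a' x = true)
    (h : pvChoose cs a q = none) : pvChoose cs a' q = none := by
  rw [pvChoose_none_iff cs a q hPre] at h
  rw [pvChoose_none_iff cs a' q hPre]
  intro c hcm
  have hc := h c hcm
  simp only [pvP, Bool.and_eq_false_iff] at hc ⊢
  rcases hc with hc | hc
  · exact Or.inl hc
  · have hmem : PySem.Set.contains a c.1 = true := by
      cases hval : PySem.Set.contains a c.1
      · rw [hval] at hc; exact absurd hc (by simp)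
      · rfl
    have h2 : PySem.Set.contains a' c.1 = true := hsub c.1 hmem
    exact Or.inr (by rw [h2]; rfl)

-- outcome analysis of one station step of A (under Pre_)
theorem pvStepA_cases (cs : List (String × String × Int)) (s : String × String)
    (hPre : ∀ c ∈ cs, c.2.1 = s.2 → c.1 ≠ "" ∧ 0 ≤ c.2.2)
    (st : PySem.Dict String String × PySem.Set String × Bool) :
    (pvA_step cs st s = st ∧ (st.1.contains s.1 = true ∨ pvChoose cs st.2.1 s.2 = none)) ∨
    (∃ n, pvChoose cs st.2.1 s.2 = some n ∧ st.1.contains s.1 = false ∧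
      pvA_step cs st s = (st.1.insert s.1 n, PySem.Set.add st.2.1 n, true)) := by
  by_cases hc : st.1.contains s.1 = true
  · exact Or.inl ⟨by simp [pvA_step, hc], Or.inl hc⟩
  · have hcF : st.1.contains s.1 = false := by simpa using hc
    rcases hs : pvA_scan cs st.2.1 s.2 with ⟨b, m⟩
    cases b with
    | none => exact Or.inl ⟨by simp [pvA_step, hcF, hs], Or.inr (by simp [pvChoose, hs])⟩
    | some n =>
      have hn : n ≠ "" := by
        have hsome : (cs.foldl (pvScanStep st.2.1 s.2) (none, -1)).1 = some n := by
          rw [← pvScan_eq_foldl, hs]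
        rcases pvScan_some_mem st.2.1 s.2 cs (none, -1) n hsome with h' | ⟨c, hcm, hcn, hcq⟩
        · exact absurd h' (by simp)
        · exact hcn ▸ (hPre c hcm hcq).1
      have hnb : (n == "") = false := by simpa using hn
      refine Or.inr ⟨n, by simp [pvChoose, hs], hcF, ?_⟩
      simp [pvA_step, hcF, hs, hnb]

theorem pvStepA_dict_mono (cs : List (String × String × Int)) (s : String × String)
    (hPre : ∀ c ∈ cs, c.2.1 = s.2 → c.1 ≠ "" ∧ 0 ≤ c.2.2)
    (st : PySem.Dict String String × PySem.Set String × Bool) (k : String)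
    (h : st.1.contains k = true) : (pvA_step cs st s).1.contains k = true := by
  rcases pvStepA_cases cs s hPre st with ⟨heq, -⟩ | ⟨n, -, -, heq⟩ <;> rw [heq]
  · exact h
  · simp [PySem.Dict.contains_insert, h]

theorem pvStepA_set_mono (cs : List (String × String × Int)) (s : String × String)
    (hPre : ∀ c ∈ cs, c.2.1 = s.2 → c.1 ≠ "" ∧ 0 ≤ c.2.2)
    (st : PySem.Dict String String × PySem.Set String × Bool) (x : String)
    (h : PySem.Set.contains st.2.1 x = true) : PySem.Set.contains (pvA_step cs st s).2.1 x = true := by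
  rcases pvStepA_cases cs s hPre st with ⟨heq, -⟩ | ⟨n, -, -, heq⟩ <;> rw [heq]
  · exact h
  · have hx : x ∈ st.2.1 := by simpa [PySem.Set.contains] using h
    have : x ∈ PySem.Set.add st.2.1 n := (PySem.Set.mem_add st.2.1 n x).mpr (Or.inl hx)
    simpa [PySem.Set.contains] using this

theorem pvFold_dict_mono (cs : List (String × String × Int)) (sts : List (String × String))
    (hPre : ∀ s ∈ sts, ∀ c ∈ cs, c.2.1 = s.2 → c.1 ≠ "" ∧ 0 ≤ c.2.2) :
    ∀ (st : PySem.Dict String String × PySem.Set String × Bool) (k : String),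
      st.1.contains k = true → (sts.foldl (pvA_step cs) st).1.contains k = true := by
  induction sts with
  | nil => intro st k h; exact h
  | cons s rest ih =>
    intro st k h
    simp only [List.foldl_cons]
    exact ih (fun s' hs' => hPre s' (List.mem_cons_of_mem _ hs')) _ k
      (pvStepA_dict_mono cs s (hPre s (List.mem_cons_self ..)) st k h)

theorem pvFold_set_mono (cs : List (String × String × Int)) (sts : List (String × String))
    (hPre : ∀ s ∈ sts, ∀ c ∈ cs, c.2.1 = s.2 → c.1 ≠ "" ∧ 0 ≤ c.2.2) :
    ∀ (st : PySem.Dict String String × PySem.Set String × Bool) (x : String),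
      PySem.Set.contains st.2.1 x = true → PySem.Set.contains (sts.foldl (pvA_step cs) st).2.1 x = true := by
  induction sts with
  | nil => intro st x h; exact h
  | cons s rest ih =>
    intro st x h
    simp only [List.foldl_cons]
    exact ih (fun s' hs' => hPre s' (List.mem_cons_of_mem _ hs')) _ x
      (pvStepA_set_mono cs s (hPre s (List.mem_cons_self ..)) st x h)

theorem pvStepA_skip (cs : List (String × String × Int)) (s : String × String)
    (hPre : ∀ c ∈ cs, c.2.1 = s.2 → c.1 ≠ "" ∧ 0 ≤ c.2.2)
    (st : PySem.Dict String String × PySem.Set String × Bool)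
    (h : st.1.contains s.1 = true ∨ pvChoose cs st.2.1 s.2 = none) : pvA_step cs st s = st := by
  rcases pvStepA_cases cs s hPre st with ⟨heq, -⟩ | ⟨n, hch, hcc, -⟩
  · exact heq
  · rcases h with h | h
    · rw [h] at hcc; exact absurd hcc (by simp)
    · rw [h] at hch; exact absurd hch (by simp)

theorem pvFold_fix (cs : List (String × String × Int)) (sts : List (String × String))
    (hPre : ∀ s ∈ sts, ∀ c ∈ cs, c.2.1 = s.2 → c.1 ≠ "" ∧ 0 ≤ c.2.2) :
    ∀ (st : PySem.Dict String String × PySem.Set String × Bool),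
      (∀ s ∈ sts, st.1.contains s.1 = true ∨ pvChoose cs st.2.1 s.2 = none) →
      sts.foldl (pvA_step cs) st = st := by
  induction sts with
  | nil => intro st _; rfl
  | cons s rest ih =>
    intro st h
    simp only [List.foldl_cons]
    rw [pvStepA_skip cs s (hPre s (List.mem_cons_self ..)) st (h s (List.mem_cons_self ..))]
    exact ih (fun s' hs' => hPre s' (List.mem_cons_of_mem _ hs')) st
      (fun s' hs' => h s' (List.mem_cons_of_mem _ hs'))

theorem pvFold_post (cs : List (String × String × Int)) (sts : List (String × String))
    (hPre : ∀ s ∈ sts, ∀ c ∈ cs, c.2.1 = s.2 → c.1 ≠ "" ∧ 0 ≤ c.2.2) :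
    ∀ (st : PySem.Dict String String × PySem.Set String × Bool),
      ∀ s ∈ sts,
        ((sts.foldl (pvA_step cs) st).1.contains s.1 = true ∨
          pvChoose cs (sts.foldl (pvA_step cs) st).2.1 s.2 = none) := by
  induction sts with
  | nil => intro st s hs; simp at hs
  | cons s0 rest ih =>
    intro st s hs
    have hPre' : ∀ s' ∈ rest, ∀ c ∈ cs, c.2.1 = s'.2 → c.1 ≠ "" ∧ 0 ≤ c.2.2 :=
      fun s' hs' => hPre s' (List.mem_cons_of_mem _ hs')
    simp only [List.foldl_cons]
    rcases List.mem_cons.mp hs with heq | hmem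
    · subst heq
      have hPs : ∀ c ∈ cs, c.2.1 = s.2 → c.1 ≠ "" ∧ 0 ≤ c.2.2 := hPre s (List.mem_cons_self ..)
      rcases pvStepA_cases cs s hPs st with ⟨heq2, hor⟩ | ⟨n, -, -, heq2⟩
      · rw [heq2]
        rcases hor with hor | hor
        · exact Or.inl (pvFold_dict_mono cs rest hPre' st s.1 hor)
        · exact Or.inr (pvChoose_none_mono cs st.2.1 _ s.2
            (fun c hcm hq => (hPs c hcm hq).2)
            (fun x hx => pvFold_set_mono cs rest hPre' st x hx) hor)
      · rw [heq2]
        refine Or.inl (pvFold_dict_mono cs rest hPre' _ s.1 ?_)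
        simp [PySem.Dict.contains_insert]
    · exact ih hPre' (pvA_step cs st s0) s hmem

-- ===== VERDICT (by name: the statement is the Claim_ definition above) =====
theorem assign_candidates_to_stations_spec : Claim_equal_assign_candidates_to_stations := by
  unfold Claim_equal_assign_candidates_to_stations
  intro sts cs _ hPre0
  have hPre : ∀ s ∈ sts, ∀ c ∈ cs, c.2.1 = s.2 → c.1 ≠ "" ∧ 0 ≤ c.2.2 :=
    fun s hsm c hcm hq => hPre0 c hcm (List.mem_map.mpr ⟨s, hsm, hq.symm⟩)
  unfold Spec_assign_candidates_to_stations
  have hB' : ((sts.foldl (pvA_step cs) (PySem.Dict.empty, PySem.Set.empty, false)).1,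
      (sts.foldl (pvA_step cs) (PySem.Dict.empty, PySem.Set.empty, false)).2.1) =
      sts.foldl (pvB_step (PySem.List.sorted cs pvKey false)) (PySem.Dict.empty, PySem.Set.empty) :=
    pvPass_proj cs sts hPre _
  have halt : assign_candidates_to_stations_alt sts cs
      = (sts.foldl (pvB_step (PySem.List.sorted cs pvKey false)) (PySem.Dict.empty, PySem.Set.empty)).1.items := rfl
  have hA : assign_candidates_to_stations sts cs
      = (pvA_loop sts cs (sts.length + 1) PySem.Dict.empty PySem.Set.empty).items := rfl
  have hloop : pvA_loop sts cs (sts.length + 1) PySem.Dict.empty PySem.Set.empty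
      = (sts.foldl (pvA_step cs) (PySem.Dict.empty, PySem.Set.empty, false)).1 := by
    cases sts with
    | nil => rfl
    | cons s0 rest =>
      rw [pvA_loop]
      have hsz : (PySem.Dict.empty : PySem.Dict String String).size < (s0 :: rest).length := by
        simp [PySem.Dict.empty, PySem.Dict.size]
      rw [if_pos hsz]
      show (if (pvA_pass cs (s0 :: rest) PySem.Dict.empty PySem.Set.empty).2.2 = true then
          pvA_loop (s0 :: rest) cs (rest.length + 1)
            (pvA_pass cs (s0 :: rest) PySem.Dict.empty PySem.Set.empty).1
            (pvA_pass cs (s0 :: rest) PySem.Dict.empty PySem.Set.empty).2.1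
        else (pvA_pass cs (s0 :: rest) PySem.Dict.empty PySem.Set.empty).1) = _
      have hPR : pvA_pass cs (s0 :: rest) PySem.Dict.empty PySem.Set.empty
          = (s0 :: rest).foldl (pvA_step cs) (PySem.Dict.empty, PySem.Set.empty, false) := rfl
      by_cases hf : (pvA_pass cs (s0 :: rest) PySem.Dict.empty PySem.Set.empty).2.2 = true
      · rw [if_pos hf]
        rw [pvA_loop]
        by_cases hsz2 : (pvA_pass cs (s0 :: rest) PySem.Dict.empty PySem.Set.empty).1.size < (s0 :: rest).length
        · rw [if_pos hsz2]
          have hfix : pvA_pass cs (s0 :: rest)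
              (pvA_pass cs (s0 :: rest) PySem.Dict.empty PySem.Set.empty).1
              (pvA_pass cs (s0 :: rest) PySem.Dict.empty PySem.Set.empty).2.1
              = ((pvA_pass cs (s0 :: rest) PySem.Dict.empty PySem.Set.empty).1,
                 (pvA_pass cs (s0 :: rest) PySem.Dict.empty PySem.Set.empty).2.1, false) := by
            unfold pvA_pass
            apply pvFold_fix cs (s0 :: rest) hPre
            intro s hsmem
            have hp := pvFold_post cs (s0 :: rest) hPre
              ((PySem.Dict.empty : PySem.Dict String String), (PySem.Set.empty : PySem.Set String), false)
              s hsmem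
            rw [← hPR] at hp
            simpa using hp
          rw [hfix]
          rfl
        · rw [if_neg hsz2]
          rw [hPR]
      · rw [if_neg hf]
        rw [hPR]
  rw [halt, hA, hloop, ← hB']
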